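-- pv_equiv track=rewrite | github.com/KaarLarax/Cryptography | practices/tar-02/main.py | _pad_key
-- ===== SOURCE A (Python) =====
-- def _pad_key(text, key):
--     padded_key = ''
--     i = 0
--     for char in text:
--         if char.isalpha():
--             padded_key += key[i % len(key)]
--             i += 1
--         else:
--             padded_key += ' '
--     return padded_key
-- ===== SOURCE B (Python) =====
-- def _alpha_run(rest, want_alpha):
--     k = 0
--     while k < len(rest) and rest[k].isalpha() == want_alpha:
--         k += 1
--     return k
--
--
-- def _pad_key(text, key):
--     pieces = []
--     used = 0
--     rest = text
--     while rest:
--         k = _alpha_run(rest, rest[0].isalpha())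
--         if rest[0].isalpha():
--             stream = key * ((used + k) // len(key) + 1)
--             pieces.append(stream[used:used + k])
--             used += k
--         else:
--             pieces.append(' ' * k)
--         rest = rest[k:]
--     return ''.join(pieces)
-- ===== Notes on version B (the rewrite author's own statement) =====
-- stated objective: alternative
-- what changed: B segments the text into maximal runs of alphabetic / non-alphabetic characters and handles each run as a block: a non-alpha run becomes ' '*k, an alpha run becomes a slice of the repeated key string (key * enough)[used:used+k]; A instead scans character by character, interleaving a running key index into per-character string concatenation.
import Mathlib
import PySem

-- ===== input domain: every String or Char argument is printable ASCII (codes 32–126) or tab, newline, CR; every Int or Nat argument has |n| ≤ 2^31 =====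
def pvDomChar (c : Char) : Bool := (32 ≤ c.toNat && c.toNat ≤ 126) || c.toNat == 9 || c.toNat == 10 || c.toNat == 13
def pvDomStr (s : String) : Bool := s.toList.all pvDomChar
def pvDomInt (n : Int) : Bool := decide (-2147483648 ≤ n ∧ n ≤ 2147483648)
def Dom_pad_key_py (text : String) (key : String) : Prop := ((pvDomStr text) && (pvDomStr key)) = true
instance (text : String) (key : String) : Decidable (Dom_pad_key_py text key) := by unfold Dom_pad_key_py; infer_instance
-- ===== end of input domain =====

-- B processes the text as maximal alphabetic / non-alphabetic RUNS, turning a non-alpha run into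
-- a block of spaces and an alpha run into a slice of the repeated key string, instead of A's
-- per-character scan with a running key index. Equivalence is about return values; no mutation.

-- ===== PORT A =====
-- key[i % len(key)] (the ' ' default is never reached under Pre_, which keeps len(key) > 0)
def pvKeyAt (ks : List Char) (j : Nat) : Char :=
  (PySem.List.pyGet? ks ((j % ks.length : Nat) : Int)).getD ' '

def pad_key_py (text : String) (key : String) : String :=
  let ks := key.toList
  let st := text.toList.foldl
    (fun (st : List Char × Nat) ch =>
      if PySem.Chars.isalpha ch then (st.1 ++ [pvKeyAt ks st.2], st.2 + 1)
      else (st.1 ++ [' '], st.2))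
    ([], 0)
  String.ofList st.1

-- ===== PORT B =====
-- the while loop of _alpha_run: count how many leading chars have isalpha == want
def pvAlphaRun : List Char → Bool → Nat
  | [], _ => 0
  | c :: t, want => if PySem.Chars.isalpha c == want then 1 + pvAlphaRun t want else 0

theorem pvAlphaRun_pos (c : Char) (t : List Char) :
    1 ≤ pvAlphaRun (c :: t) (PySem.Chars.isalpha c) := by
  simp [pvAlphaRun]

-- the main while loop over `rest`, carrying `used` (key characters consumed so far);
-- key * n is n concatenated copies, stream[used:used+k] with Nat bounds is drop/take
-- (= PySem.List.slice_natCast_add); (used+k) // len(key) on Nats is Nat division.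
def pvGo (ks : List Char) : List Char → Nat → List Char
  | [], _ => []
  | c :: t, used =>
    let k := pvAlphaRun (c :: t) (PySem.Chars.isalpha c)
    if PySem.Chars.isalpha c then
      ((((List.replicate ((used + k) / ks.length + 1) ks).flatten).drop used).take k)
        ++ pvGo ks ((c :: t).drop k) (used + k)
    else
      List.replicate k ' ' ++ pvGo ks ((c :: t).drop k) used
  termination_by cs _ => cs.length
  decreasing_by
    all_goals
      simp only [List.length_drop, List.length_cons]
      have := pvAlphaRun_pos c t
      omega

def pad_key_py_alt (text : String) (key : String) : String :=
  String.ofList (pvGo key.toList text.toList 0)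

-- ===== PRECONDITION & SPEC =====
-- Pre_ excludes exactly the inputs where the Python A raises ZeroDivisionError: an empty key
-- together with at least one alphabetic character in text (Python B raises there too).
def Pre_pad_key_py (text : String) (key : String) : Prop :=
  text.toList.any PySem.Chars.isalpha = true → key ≠ ""
instance (text : String) (key : String) : Decidable (Pre_pad_key_py text key) := by
  unfold Pre_pad_key_py; infer_instance
def pvWitness_pad_key_py : String × String := ("ab c!", "kO")

def Spec_pad_key_py (text : String) (key : String) (out : String) : Prop := out = pad_key_py_alt text key
instance (text : String) (key : String) (out : String) : Decidable (Spec_pad_key_py text key out) := by unfold Spec_pad_key_py; infer_instance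

-- ===== CLAIM (what is proved, stated in full; the proofs are below) =====
def Claim_equal_pad_key_py : Prop := ∀ (text : String) (key : String), Dom_pad_key_py text key → Pre_pad_key_py text key → Spec_pad_key_py text key (pad_key_py text key)

-- ===== LEMMAS AND PROOFS =====

-- the common characterisation: the result list given the key index reached so far
def pvSpecList (ks : List Char) : List Char → Nat → List Char
  | [], _ => []
  | c :: t, j =>
    if PySem.Chars.isalpha c then pvKeyAt ks j :: pvSpecList ks t (j + 1)
    else ' ' :: pvSpecList ks t j

theorem pvFoldA_eq (ks : List Char) (cs : List Char) :
    ∀ (acc : List Char) (i : Nat),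
      (cs.foldl
        (fun (st : List Char × Nat) ch =>
          if PySem.Chars.isalpha ch then (st.1 ++ [pvKeyAt ks st.2], st.2 + 1)
          else (st.1 ++ [' '], st.2)) (acc, i)).1 = acc ++ pvSpecList ks cs i := by
  induction cs with
  | nil => intro acc i; simp [pvSpecList]
  | cons c t ih =>
    intro acc i
    by_cases h : PySem.Chars.isalpha c
    · simp [List.foldl, h, pvSpecList, ih]
    · simp [List.foldl, h, pvSpecList, ih]

theorem pvAlphaRun_eq_takeWhile (want : Bool) (cs : List Char) :
    pvAlphaRun cs want = (cs.takeWhile (fun c => PySem.Chars.isalpha c == want)).length := by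
  induction cs with
  | nil => simp [pvAlphaRun]
  | cons c t ih =>
    by_cases h : PySem.Chars.isalpha c == want
    · simp [pvAlphaRun, h, List.takeWhile, ih, Nat.add_comm]
    · simp [pvAlphaRun, h, List.takeWhile]

-- indexing into the repeated key
theorem pvFlattenRep_get (ks : List Char) (hk : ks ≠ []) :
    ∀ (n i : Nat), i < n * ks.length →
      ((List.replicate n ks).flatten)[i]? = ks[i % ks.length]? := by
  intro n
  induction n with
  | zero => intro i hi; simp at hi
  | succ m ih =>
    intro i hi
    have hL : 0 < ks.length := List.length_pos_iff.mpr hk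
    rw [List.replicate_succ, List.flatten_cons]
    by_cases h : i < ks.length
    · rw [List.getElem?_append_left h, Nat.mod_eq_of_lt h]
    · rw [Nat.not_lt] at h
      rw [List.getElem?_append_right h, ih (i - ks.length) (by
        rw [Nat.succ_mul] at hi; omega)]
      rw [Nat.mod_eq_sub_mod h]

theorem pvKeyAt_eq (ks : List Char) (hk : ks ≠ []) (j : Nat) :
    ks[j % ks.length]? = some (pvKeyAt ks j) := by
  have hL : 0 < ks.length := List.length_pos_iff.mpr hk
  have hlt : j % ks.length < ks.length := Nat.mod_lt _ hL
  unfold pvKeyAt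
  rw [PySem.List.pyGet?_natCast]
  simp [List.getElem?_eq_getElem hlt]

-- stream[used:used+k] spelled as the key characters A reads
theorem pvStreamSlice (ks : List Char) (hk : ks ≠ []) (used k : Nat) :
    ((((List.replicate ((used + k) / ks.length + 1) ks).flatten).drop used).take k)
      = (List.range k).map (fun j => pvKeyAt ks (used + j)) := by
  have hL : 0 < ks.length := List.length_pos_iff.mpr hk
  have hlen : used + k < ((used + k) / ks.length + 1) * ks.length := by
    rw [Nat.add_mul, Nat.one_mul]
    have h1 := Nat.div_add_mod (used + k) ks.length
    rw [Nat.mul_comm] at h1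
    have h2 := Nat.mod_lt (used + k) hL
    omega
  have hflen : ((List.replicate ((used + k) / ks.length + 1) ks).flatten).length
      = ((used + k) / ks.length + 1) * ks.length := by
    simp [List.length_flatten, Nat.mul_comm]
  apply List.ext_getElem?
  intro j
  rw [List.getElem?_take]
  by_cases hj : j < k
  · rw [if_pos hj, List.getElem?_drop,
      pvFlattenRep_get ks hk _ (used + j) (by omega),
      pvKeyAt_eq ks hk, List.getElem?_map, List.getElem?_range hj]
    rfl
  · rw [if_neg hj]
    symm
    rw [List.getElem?_eq_none]
    · simp only [List.length_map, List.length_range]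
      omega

theorem pvSpec_alpha_run (ks : List Char) (run : List Char)
    (h : ∀ c ∈ run, PySem.Chars.isalpha c = true) :
    ∀ (rest : List Char) (used : Nat),
      pvSpecList ks (run ++ rest) used
        = (List.range run.length).map (fun j => pvKeyAt ks (used + j))
          ++ pvSpecList ks rest (used + run.length) := by
  induction run with
  | nil => intro rest used; simp
  | cons c t ih =>
    intro rest used
    have hc := h c (by simp)
    have ht : ∀ x ∈ t, PySem.Chars.isalpha x = true := fun x hx => h x (by simp [hx])
    simp only [List.cons_append, pvSpecList, hc, if_pos, ih ht rest (used + 1),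
      List.length_cons, List.range_succ_eq_map, List.map_cons, List.map_map,
      Nat.add_zero, List.cons_append]
    congr 1
    congr 1
    · apply List.map_congr_left
      intro j _
      simp only [Function.comp_apply]
      congr 1
      omega
    · congr 1
      omega

theorem pvSpec_space_run (ks : List Char) (run : List Char)
    (h : ∀ c ∈ run, PySem.Chars.isalpha c = false) :
    ∀ (rest : List Char) (used : Nat),
      pvSpecList ks (run ++ rest) used
        = List.replicate run.length ' ' ++ pvSpecList ks rest used := by
  induction run with
  | nil => intro rest used; simp
  | cons c t ih =>
    intro rest used
    have hc := h c (by simp)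
    have ht : ∀ x ∈ t, PySem.Chars.isalpha x = false := fun x hx => h x (by simp [hx])
    simp [List.cons_append, pvSpecList, hc, ih ht rest used, List.replicate_succ]

theorem pvGo_eq_spec (ks : List Char) (cs : List Char) (used : Nat)
    (hks : cs.any PySem.Chars.isalpha = true → ks ≠ []) :
    pvGo ks cs used = pvSpecList ks cs used := by
  match cs with
  | [] => simp [pvGo, pvSpecList]
  | c :: t =>
    set p := fun x => PySem.Chars.isalpha x == PySem.Chars.isalpha c with hp
    set run := (c :: t).takeWhile p with hrun
    set rest := (c :: t).dropWhile p with hrest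
    have hk : pvAlphaRun (c :: t) (PySem.Chars.isalpha c) = run.length :=
      pvAlphaRun_eq_takeWhile _ _
    have hsplit : run ++ rest = c :: t := List.takeWhile_append_dropWhile
    have hdrop : (c :: t).drop run.length = rest := by
      rw [← hsplit, List.drop_left]
    have hrest_lt : rest.length < (c :: t).length := by
      rw [← hdrop]
      have h1 := pvAlphaRun_pos c t
      rw [hk] at h1
      simp only [List.length_drop, List.length_cons]
      omega
    have hrest_any : rest.any PySem.Chars.isalpha = true → ks ≠ [] := by
      intro h
      apply hks
      rw [List.any_eq_true] at h ⊢
      obtain ⟨x, hx, hxa⟩ := h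
      exact ⟨x, (List.dropWhile_sublist _).mem hx, hxa⟩
    have hrec := pvGo_eq_spec ks rest
    by_cases hc : PySem.Chars.isalpha c = true
    · have hks' : ks ≠ [] := hks (by simp [hc])
      have hrun_alpha : ∀ x ∈ run, PySem.Chars.isalpha x = true := by
        intro x hx
        have hmem := List.mem_takeWhile_imp hx
        simp only [hp, beq_iff_eq, hc] at hmem
        exact hmem
      rw [hc] at hk
      rw [pvGo]
      simp only [hc, if_true, hk, hdrop]
      rw [hrec _ hrest_any, pvStreamSlice ks hks', ← hsplit,
        pvSpec_alpha_run ks run hrun_alpha rest used]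
    · have hc' : PySem.Chars.isalpha c = false := by
        rw [← Bool.not_eq_true]; exact hc
      have hrun_space : ∀ x ∈ run, PySem.Chars.isalpha x = false := by
        intro x hx
        have hmem := List.mem_takeWhile_imp hx
        simp only [hp, beq_iff_eq] at hmem
        rw [hmem, hc']
      rw [hc'] at hk
      rw [pvGo]
      simp only [hc', Bool.false_eq_true, if_false, hk, hdrop]
      rw [hrec _ hrest_any, ← hsplit,
        pvSpec_space_run ks run hrun_space rest used]
  termination_by cs.length
  decreasing_by exact hrest_lt

-- ===== VERDICT (by name: the statement is the Claim_ definition above) =====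
theorem pad_key_py_spec : Claim_equal_pad_key_py := by
  intro text key _ hpre
  unfold Spec_pad_key_py pad_key_py pad_key_py_alt
  simp only []
  rw [pvFoldA_eq key.toList text.toList [] 0, List.nil_append,
    pvGo_eq_spec key.toList text.toList 0
      (fun h => fun hnil => hpre h (String.toList_eq_nil_iff.mp hnil))]
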